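-- pv_equiv track=rewrite | github.com/smaximv88-cyber/Python-list-sort | text_analyzer.py | func_text
-- ===== SOURCE A (Python) =====
-- import string
-- from collections import Counter
--
-- def func_text (text):
--     text = text.lower()
--     text_ignor = ['the', 'and', 'a', 'in', 'on', 'at', 'to', 'for', 'of', 'is', 'are']
--     new_text = ''.join(char for char in text if char not in string.punctuation)
--     new_text = new_text.split(" ")
--     filter_words = [word for word in new_text if word not in text_ignor]
--     word_count = Counter(filter_words)
--     return {word: count for word, count in word_count.items() if count > 1}
-- ===== SOURCE B (Python) =====
-- import string
--
--
-- def func_text(text):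
--     text = text.lower()
--     stop = ['the', 'and', 'a', 'in', 'on', 'at', 'to', 'for', 'of', 'is', 'are']
--     cleaned = ''.join(ch for ch in text if ch not in string.punctuation)
--     words = [w for w in cleaned.split(" ") if w not in stop]
--     # sort, then scan consecutive runs: a run longer than 1 is a repeated word
--     sw = sorted(words)
--     repeated = {}
--     while sw:
--         w = sw[0]
--         run = 1
--         while run < len(sw) and sw[run] == w:
--             run += 1
--         if run > 1:
--             repeated[w] = run
--         sw = sw[run:]
--     # rebuild in first-occurrence order (re-assignments keep position and value)
--     return {w: repeated[w] for w in words if w in repeated}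
-- ===== Notes on version B (the rewrite author's own statement) =====
-- stated objective: alternative
-- what changed: Replaces the Counter hash-count pass by sorting the filtered tokens and scanning consecutive equal runs (a run longer than 1 is a repeated word), then rebuilding the result in first-occurrence order by a single pass over the token list.
import Mathlib
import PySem

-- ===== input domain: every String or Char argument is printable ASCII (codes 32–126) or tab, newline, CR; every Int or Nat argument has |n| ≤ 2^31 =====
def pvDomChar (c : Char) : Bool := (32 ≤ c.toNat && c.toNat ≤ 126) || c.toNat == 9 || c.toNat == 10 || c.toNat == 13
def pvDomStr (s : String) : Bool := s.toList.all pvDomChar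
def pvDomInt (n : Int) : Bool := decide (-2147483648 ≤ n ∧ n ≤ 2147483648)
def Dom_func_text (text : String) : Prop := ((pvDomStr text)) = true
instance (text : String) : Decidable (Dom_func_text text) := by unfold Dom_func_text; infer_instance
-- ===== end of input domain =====

-- B replaces A's Counter hash-count pass by sorting the filtered tokens and scanning
-- consecutive equal runs, then rebuilding the dict in first-occurrence order (alternative).

-- string.punctuation
def pvPunct : List Char := "!\"#$%&'()*+,-./:;<=>?@[\\]^_`{|}~".toList
-- the stopword list both Pythons carry
def pvStop : List String := ["the", "and", "a", "in", "on", "at", "to", "for", "of", "is", "are"]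

-- ===== PORT A =====
def func_text (text : String) : List (String × Int) :=
  let lowered := PySem.Str.lower text
  let newText := String.ofList (lowered.toList.filter (fun ch => !pvPunct.contains ch))
  let words := (PySem.Str.split? newText " ").getD []   -- sep " " ≠ "": split? never none here
  let filterWords := words.filter (fun w => !pvStop.contains w)
  let wordCount := PySem.Dict.counter filterWords
  wordCount.items.filter (fun p => decide ((1 : Int) < p.2))

-- ===== PORT B =====
-- the 'while sw: … sw = sw[run:]' loop of Source B: scan one run of equal words, record it if
-- longer than 1, continue on the rest
def pvRuns : List String → PySem.Dict String Int → PySem.Dict String Int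
  | [], d => d
  | w :: rest, d =>
    let same := rest.takeWhile (fun x => x == w)
    let run : Int := 1 + same.length
    pvRuns (rest.drop same.length) (if 1 < run then d.insert w run else d)
termination_by l _ => l.length
decreasing_by simp

def func_text_alt (text : String) : List (String × Int) :=
  let lowered := PySem.Str.lower text
  let cleaned := String.ofList (lowered.toList.filter (fun ch => !pvPunct.contains ch))
  let words := ((PySem.Str.split? cleaned " ").getD []).filter (fun w => !pvStop.contains w)   -- sep " " ≠ ""
  let sw := PySem.List.sorted words (fun w => w) false
  let repeated := pvRuns sw PySem.Dict.empty
  (words.foldl (fun (d : PySem.Dict String Int) w =>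
      match repeated.get? w with
      | some c => d.insert w c
      | none => d) PySem.Dict.empty).items

-- ===== PRECONDITION & SPEC =====
def Spec_func_text (text : String) (out : List (String × Int)) : Prop := out = func_text_alt text
instance (text : String) (out : List (String × Int)) : Decidable (Spec_func_text text out) := by unfold Spec_func_text; infer_instance

-- ===== CLAIM (what is proved, stated in full; the proofs are below) =====
def Claim_equal_func_text : Prop := ∀ (text : String), Dom_func_text text → Spec_func_text text (func_text text)

-- ===== LEMMAS AND PROOFS =====

-- one unfolding step of the run-scan loop
theorem pvRuns_cons (x : String) (rest : List String) (d : PySem.Dict String Int) :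
    pvRuns (x :: rest) d =
      pvRuns (rest.drop (rest.takeWhile (fun z => z == x)).length)
        (if (1 : Int) < 1 + ((rest.takeWhile (fun z => z == x)).length : Int) then
          d.insert x (1 + ((rest.takeWhile (fun z => z == x)).length : Int)) else d) := by
  rw [pvRuns]

-- in a ≤-sorted list whose elements are all ≥ x, everything after the leading block of x's differs from x
theorem pv_dropWhile_ne (x : String) :
    ∀ (l : List String), l.Pairwise (· ≤ ·) → (∀ y ∈ l, x ≤ y) →
      ∀ y ∈ l.dropWhile (fun z => z == x), y ≠ x := by
  intro l
  induction l with
  | nil => intro _ _ y hy; simp [List.dropWhile] at hy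
  | cons a t ih =>
    intro hp hge y hy
    rw [List.pairwise_cons] at hp
    simp only [List.dropWhile_cons] at hy
    by_cases ha : (a == x) = true
    · rw [if_pos ha] at hy
      exact ih hp.2 (fun z hz => hge z (List.mem_cons_of_mem _ hz)) y hy
    · rw [if_neg ha] at hy
      have hax : x < a :=
        lt_of_le_of_ne (hge a (List.mem_cons_self)) (fun h => ha (by simp [h]))
      rcases List.mem_cons.mp hy with rfl | hyt
      · exact (ne_of_gt hax)
      · exact ne_of_gt (lt_of_lt_of_le hax (hp.1 y hyt))

-- run-scan correctness on a sorted list: a lookup in the produced dict is the (>1) multiplicity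
theorem pv_runs_get_aux (n : Nat) :
    ∀ (l : List String), l.length ≤ n → ∀ (d : PySem.Dict String Int) (w : String),
      l.Pairwise (· ≤ ·) →
      (pvRuns l d).get? w =
        if 1 < l.count w then some ((l.count w : Int)) else d.get? w := by
  induction n with
  | zero =>
    intro l hl d w _
    have : l = [] := List.length_eq_zero_iff.mp (Nat.le_zero.mp hl)
    subst this
    simp [pvRuns]
  | succ n ih =>
    intro l hl d w hs
    cases l with
    | nil => simp [pvRuns]
    | cons x rest =>
      rw [List.pairwise_cons] at hs
      rw [pvRuns_cons]
      have hsplit : rest.takeWhile (fun z => z == x) ++ rest.dropWhile (fun z => z == x) = rest :=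
        List.takeWhile_append_dropWhile
      have hrem : rest.drop (rest.takeWhile (fun z => z == x)).length
          = rest.dropWhile (fun z => z == x) := by
        have h := List.drop_left (l₁ := rest.takeWhile (fun z => z == x))
          (l₂ := rest.dropWhile (fun z => z == x))
        rw [hsplit] at h
        exact h
      have hremPW : (rest.drop (rest.takeWhile (fun z => z == x)).length).Pairwise (· ≤ ·) := by
        rw [hrem]; exact hs.2.sublist (List.dropWhile_sublist _)
      have hne : ∀ y ∈ rest.drop (rest.takeWhile (fun z => z == x)).length, y ≠ x := by
        rw [hrem]; exact pv_dropWhile_ne x rest hs.2 hs.1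
      have hsame : ∀ y ∈ rest.takeWhile (fun z => z == x), y = x := fun y hy => by
        have := List.mem_takeWhile_imp (p := fun z => z == x) hy
        simpa using this
      have hcsame : (rest.takeWhile (fun z => z == x)).count x
          = (rest.takeWhile (fun z => z == x)).length :=
        List.count_eq_length.mpr (fun b hb => by simp [hsame b hb])
      have hcrem : (rest.drop (rest.takeWhile (fun z => z == x)).length).count x = 0 :=
        List.count_eq_zero.mpr (fun h => hne x h rfl)
      have hcrem2 : (rest.dropWhile (fun z => z == x)).count x = 0 := by
        rw [← hrem]; exact hcrem
      have hcrest : rest.count x = (rest.takeWhile (fun z => z == x)).length := by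
        conv_lhs => rw [← hsplit]
        rw [List.count_append, hcsame, hcrem2]
        omega
      have hlen : (rest.drop (rest.takeWhile (fun z => z == x)).length).length ≤ n := by
        have h1 := List.length_drop (l := rest) (i := (rest.takeWhile (fun z => z == x)).length)
        have h2 : rest.length + 1 ≤ n + 1 := by simpa using hl
        omega
      have hIH := ih _ hlen
        (if (1 : Int) < 1 + ((rest.takeWhile (fun z => z == x)).length : Int) then
          d.insert x (1 + ((rest.takeWhile (fun z => z == x)).length : Int)) else d) w hremPW
      rw [hIH]
      by_cases hwx : w = x
      · simp only [hwx]
        rw [hcrem, List.count_cons_self, hcrest]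
        by_cases hk : 0 < (rest.takeWhile (fun z => z == x)).length
        · rw [if_neg (show ¬ (1 < (0 : Nat)) by omega),
              if_pos (show (1 : Int) < 1 + ((rest.takeWhile (fun z => z == x)).length : Int) by omega),
              PySem.Dict.get?_insert_self,
              if_pos (show 1 < (rest.takeWhile (fun z => z == x)).length + 1 by omega)]
          congr 1
          push_cast
          ring
        · have hk0 : (rest.takeWhile (fun z => z == x)).length = 0 := by omega
          rw [hk0]
          simp
      · have hcsame' : (rest.takeWhile (fun z => z == x)).count w = 0 :=
          List.count_eq_zero.mpr (fun h => hwx (hsame w h))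
        have hcw : (x :: rest).count w = (rest.drop (rest.takeWhile (fun z => z == x)).length).count w := by
          rw [List.count_cons_of_ne (Ne.symm hwx)]
          conv_lhs => rw [← hsplit]
          rw [List.count_append, hcsame', hrem]
          omega
        rw [hcw]
        split_ifs with h h2
        · rfl
        · exact PySem.Dict.get?_insert_of_ne _ _ hwx
        · rfl

theorem pv_runs_get (l : List String) (d : PySem.Dict String Int) (w : String)
    (hs : l.Pairwise (· ≤ ·)) :
    (pvRuns l d).get? w =
      if 1 < l.count w then some ((l.count w : Int)) else d.get? w :=
  pv_runs_get_aux l.length l le_rfl d w hs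

-- the order-restoring pass: folding 'if w in repeated: out[w] = repeated[w]' over ws builds
-- exactly the first-occurrence-ordered item list of the repeated words
theorem pv_rebuild (g : String → Option Int) :
    ∀ (ws pre : List String),
      (ws.foldl (fun (d : PySem.Dict String Int) w =>
          match g w with | some c => d.insert w c | none => d)
        (PySem.Dict.mk (((PySem.Set.ofList pre).filter (fun w => (g w).isSome)).map
          (fun w => (w, (g w).getD 0))))).items
      = ((PySem.Set.ofList (pre ++ ws)).filter (fun w => (g w).isSome)).map
          (fun w => (w, (g w).getD 0)) := by
  intro ws
  induction ws with
  | nil => intro pre; simp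
  | cons w ws ih =>
    intro pre
    have hassoc : pre ++ w :: ws = (pre ++ [w]) ++ ws := by simp
    rw [hassoc, ← ih (pre ++ [w])]
    simp only [List.foldl_cons]
    rcases hg : g w with _ | c
    · -- w is not repeated: the dict is untouched and w is filtered out of the target
      have hLL : ((PySem.Set.ofList pre).filter (fun w => (g w).isSome)).map
            (fun w => (w, (g w).getD 0))
          = ((PySem.Set.ofList (pre ++ [w])).filter (fun w => (g w).isSome)).map
            (fun w => (w, (g w).getD 0)) := by
        rw [PySem.Set.ofList_append_singleton]
        by_cases hw : w ∈ PySem.Set.ofList pre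
        · rw [PySem.Set.add_of_mem hw]
        · rw [PySem.Set.add_of_not_mem hw, List.filter_append, List.map_append]
          simp [hg]
      rw [hLL]
    · -- w is repeated: insert w (overwriting in place keeps the items list unchanged)
      dsimp only
      have hstep : (PySem.Dict.mk (((PySem.Set.ofList pre).filter (fun w => (g w).isSome)).map
            (fun w => (w, (g w).getD 0)))).insert w c
          = PySem.Dict.mk (((PySem.Set.ofList (pre ++ [w])).filter (fun w => (g w).isSome)).map
            (fun w => (w, (g w).getD 0))) := by
        by_cases hw : w ∈ PySem.Set.ofList pre
        · have hcont : (PySem.Dict.mk (((PySem.Set.ofList pre).filter (fun w => (g w).isSome)).map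
              (fun w => (w, (g w).getD 0)))).contains w = true := by
            rw [PySem.Dict.contains_mk]
            simp only [List.any_map, List.any_eq_true, Function.comp]
            exact ⟨w, List.mem_filter.mpr ⟨hw, by simp [hg]⟩, by simp⟩
          apply PySem.Dict.ext
          rw [PySem.Dict.items_insert_of_contains _ _ hcont]
          rw [PySem.Set.ofList_append_singleton, PySem.Set.add_of_mem hw, List.map_map]
          apply List.map_congr_left
          intro a _
          by_cases haw : a = w
          · subst haw; simp [hg]
          · simp [Function.comp, haw]
        · have hcont : (PySem.Dict.mk (((PySem.Set.ofList pre).filter (fun w => (g w).isSome)).map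
              (fun w => (w, (g w).getD 0)))).contains w = false := by
            rw [PySem.Dict.contains_mk]
            simp only [List.any_map, List.any_eq_false, Function.comp]
            intro a ha
            have haw : a ∈ PySem.Set.ofList pre := (List.mem_filter.mp ha).1
            simp only [beq_iff_eq]
            exact fun h => hw (h ▸ haw)
          apply PySem.Dict.ext
          rw [PySem.Dict.items_insert_of_not_contains _ _ hcont]
          rw [PySem.Set.ofList_append_singleton, PySem.Set.add_of_not_mem hw,
              List.filter_append, List.map_append]
          simp [hg]
      rw [hstep]

-- the two pipelines agree on any common filtered token list
theorem pv_main (fw : List String) :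
    (PySem.Dict.counter fw).items.filter (fun p => decide ((1 : Int) < p.2))
    = (fw.foldl (fun (d : PySem.Dict String Int) w =>
        match (pvRuns (PySem.List.sorted fw (fun w => w) false) PySem.Dict.empty).get? w with
        | some c => d.insert w c
        | none => d) PySem.Dict.empty).items := by
  set g : String → Option Int :=
    fun w => (pvRuns (PySem.List.sorted fw (fun w => w) false) PySem.Dict.empty).get? w with hgdef
  have hg : ∀ w, g w = if 1 < fw.count w then some ((fw.count w : Int)) else none := by
    intro w
    have hpw : (PySem.List.sorted fw (fun w => w) false).Pairwise (· ≤ ·) := by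
      simpa using PySem.List.sorted_pairwise fw (fun w => w)
    have hcnt : (PySem.List.sorted fw (fun w => w) false).count w = fw.count w :=
      (PySem.List.sorted_perm fw (fun w => w) false).count_eq w
    show (pvRuns (PySem.List.sorted fw (fun w => w) false) PySem.Dict.empty).get? w
        = if 1 < fw.count w then some ((fw.count w : Int)) else none
    rw [pv_runs_get _ _ _ hpw, hcnt, PySem.Dict.get?_empty]
  have hre := pv_rebuild g fw []
  simp only [PySem.Set.ofList_nil, List.filter_nil, List.map_nil, List.nil_append] at hre
  have hempty : (PySem.Dict.mk ([] : List (String × Int))) = PySem.Dict.empty := rfl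
  rw [hempty] at hre
  rw [hre, PySem.Dict.items_counter, List.filter_map]
  have hfc : ∀ w ∈ PySem.Set.ofList fw,
      ((fun p : String × Int => decide ((1 : Int) < p.2)) ∘ (fun k => (k, (fw.count k : Int)))) w
        = (g w).isSome := by
    intro w _
    rw [Function.comp_apply, hg]
    split_ifs with h
    · simp
      exact_mod_cast h
    · simp
      omega
  rw [List.filter_congr hfc]
  apply List.map_congr_left
  intro w hw
  have h1 : 1 < fw.count w := by
    have := (List.mem_filter.mp hw).2
    rw [hg] at this
    by_contra h
    rw [if_neg h] at this
    simp at this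
  rw [hg, if_pos h1]
  simp

-- ===== VERDICT (by name: the statement is the Claim_ definition above) =====
theorem func_text_spec : Claim_equal_func_text := by
  intro text _
  unfold Spec_func_text func_text func_text_alt
  exact pv_main _
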